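-- pv_equiv track=rewrite | github.com/rohitreddy192/Leetcode-DSA | 711-number-of-distinct-islands-ii/number-of-distinct-islands-ii.py | numDistinctIslands2
-- ===== SOURCE A (Python) =====
-- from typing import List, Tuple
--
-- def numDistinctIslands2(grid: List[List[int]]) -> int:
--     m, n = len(grid), len(grid[0])
--     visited = set()
--     unique_islands = set()
--
--     # Directions for DFS traversal (up, down, left, right)
--     directions = [(0,1), (1,0), (0,-1), (-1,0)]
--
--     # DFS to explore an island and store its shape
--     def dfs(x: int, y: int) -> List[Tuple[int, int]]:
--         stack = [(x, y)]
--         island = []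
--         while stack:
--             i, j = stack.pop()
--             if (i, j) in visited:
--                 continue
--             visited.add((i, j))
--             island.append((i, j))
--             for dx, dy in directions:
--                 ni, nj = i + dx, j + dy
--                 if 0 <= ni < m and 0 <= nj < n and grid[ni][nj] == 1 and (ni, nj) not in visited:
--                     stack.append((ni, nj))
--         return island
--
--     # Normalize an island shape by computing all rotations and reflections
--     def normalize(shape: List[Tuple[int, int]]) -> Tuple:
--         """
--         Normalize the shape by computing all possible transformations.
--         Each island shape can be transformed in 8 different ways:
--         - 4 Rotations (0°, 90°, 180°, 270°)
--         - 4 Reflections (left-right flip + each rotation)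
--         """
--         shapes = []
--         # Get all transformations (4 rotations, 4 reflections)
--         for _ in range(2):  # One for normal, one for reflection
--             new_shape = [(x, y) for x, y in shape]
--             for _ in range(4):  # Rotate 4 times
--                 new_shape = [(y, -x) for x, y in new_shape]  # Rotate 90° clockwise
--                 min_x = min(p[0] for p in new_shape)
--                 min_y = min(p[1] for p in new_shape)
--                 normalized = sorted((x - min_x, y - min_y) for x, y in new_shape)
--                 shapes.append(tuple(normalized))
--             # Reflect across y-axis
--             shape = [(-x, y) for x, y in shape]
--
--         return min(shapes)  # Choose the lexicographically smallest one
--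
--     # Main loop to find islands
--     for i in range(m):
--         for j in range(n):
--             if grid[i][j] == 1 and (i, j) not in visited:
--                 island = dfs(i, j)  # Get raw island shape
--                 normalized_shape = normalize(island)  # Normalize it
--                 unique_islands.add(normalized_shape)
--
--     return len(unique_islands)
-- ===== SOURCE B (Python) =====
-- from typing import List, Tuple
--
--
-- def canonical(cells) -> Tuple:
--     """Canonical form of a set of cells: the lexicographically smallest
--     sorted, origin-translated image under the 8 rotations/reflections."""
--     transforms = [
--         lambda x, y: (y, -x),
--         lambda x, y: (-x, -y),
--         lambda x, y: (-y, x),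
--         lambda x, y: (x, y),
--         lambda x, y: (y, x),
--         lambda x, y: (x, -y),
--         lambda x, y: (-y, -x),
--         lambda x, y: (-x, y),
--     ]
--     best = None
--     for t in transforms:
--         pts = [t(x, y) for x, y in cells]
--         mx = min(x for x, y in pts)
--         my = min(y for x, y in pts)
--         cand = tuple(sorted(((x - mx, y - my) for x, y in pts), key=lambda p: (p[0], p[1])))
--         if best is None or cand < best:
--             best = cand
--     return best
--
--
-- def numDistinctIslands2(grid: List[List[int]]) -> int:
--     m, n = len(grid), len(grid[0])
--     land = [(i, j) for i in range(m) for j in range(n) if grid[i][j] == 1]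
--     seen = set()
--     shapes = set()
--     for c in land:
--         if c in seen:
--             continue
--         # component of c by fixpoint expansion: no stack, no recursion
--         comp = {c}
--         while True:
--             fringe = [d for d in land
--                       if d not in comp
--                       and any(e in comp for e in ((d[0] + 1, d[1]), (d[0] - 1, d[1]),
--                                                   (d[0], d[1] + 1), (d[0], d[1] - 1)))]
--             if not fringe:
--                 break
--             comp |= set(fringe)
--         seen |= comp
--         shapes.add(canonical(comp))
--     return len(shapes)
-- ===== Notes on version B (the rewrite author's own statement) =====
-- stated objective: alternative
-- what changed: Replaces the explicit-stack DFS flood fill (push/pop with a global visited set) by a per-island fixpoint expansion over the row-major land-cell list, and the rotate-in-a-loop normalisation by a table of the 8 plane transforms with a running best-so-far minimum.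
import Mathlib
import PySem

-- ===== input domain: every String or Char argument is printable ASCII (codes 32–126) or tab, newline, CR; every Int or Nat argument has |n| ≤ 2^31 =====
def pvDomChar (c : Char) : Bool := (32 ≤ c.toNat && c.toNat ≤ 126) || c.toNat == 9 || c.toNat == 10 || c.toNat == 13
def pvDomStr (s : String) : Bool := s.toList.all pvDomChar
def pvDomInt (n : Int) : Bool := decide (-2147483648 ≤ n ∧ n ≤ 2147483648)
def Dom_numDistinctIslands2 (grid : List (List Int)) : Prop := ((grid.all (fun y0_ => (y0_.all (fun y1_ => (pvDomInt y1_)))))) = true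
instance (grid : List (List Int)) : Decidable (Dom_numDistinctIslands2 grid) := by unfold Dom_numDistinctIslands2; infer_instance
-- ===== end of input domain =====

-- B replaces A's explicit-stack DFS flood fill by a per-island fixpoint expansion over the
-- (row-major) land-cell list and a table of the 8 plane transforms with a running minimum;
-- objective: alternative (not measured faster).

-- ===== PORT A =====
abbrev PvCell : Type := Int × Int

def pvDirsA : List PvCell := [(0,1), (1,0), (0,-1), (-1,0)]

-- the neighbour guard '0 <= ni < m and 0 <= nj < n and grid[ni][nj] == 1';
-- pyGetD is exact here: the indexing only happens under the bound checks (and Pre_)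
def pvLandChkA (grid : List (List Int)) (m n i j : Int) : Bool :=
  decide (0 ≤ i) && decide (i < m) && decide (0 ≤ j) && decide (j < n) &&
  (PySem.List.pyGetD (PySem.List.pyGetD grid i []) j 0 == 1)

-- A's dfs: explicit stack, pop from the end (head of our list = end of the Python list,
-- hence 'pushes.reverse ++ rest'); fuel only totalizes the while-loop (never reached
-- for the fuel supplied at the call site, see pvDfsA_spec below)
def pvDfsA (grid : List (List Int)) (m n : Int) :
    Nat → List PvCell → PySem.Set PvCell → List PvCell → PySem.Set PvCell × List PvCell
  | 0, _, visited, island => (visited, island)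
  | fuel+1, stack, visited, island =>
    match stack with
    | [] => (visited, island)
    | c :: rest =>
      if visited.contains c then pvDfsA grid m n fuel rest visited island
      else
        let visited' := visited.add c
        let island' := island ++ [c]
        let pushes := (pvDirsA.map (fun d => (c.1 + d.1, c.2 + d.2))).filter
          (fun nb => pvLandChkA grid m n nb.1 nb.2 && !(visited'.contains nb))
        pvDfsA grid m n fuel (pushes.reverse ++ rest) visited' island'

-- new_shape = [(y, -x) for x, y in new_shape]  (rotate 90° clockwise)
def pvRotA (p : PvCell) : PvCell := (p.2, -p.1)

-- min_x/min_y and the sorted translated copy; Python compares int pairs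
-- lexicographically, which is '<' on Lex (Int × Int); min() of an empty generator
-- would raise — .getD 0 is never reached (shapes are nonempty whenever called)
def pvNormSortA (ns : List PvCell) : List PvCell :=
  let min_x := (PySem.List.min? (ns.map (fun p => p.1)) (fun v => v)).getD 0
  let min_y := (PySem.List.min? (ns.map (fun p => p.2)) (fun v => v)).getD 0
  PySem.List.sorted (ns.map (fun p => (p.1 - min_x, p.2 - min_y))) (fun p => toLex p)

-- Python '<' on tuples of int pairs = '<' on List (Lex (Int × Int)) (lexicographic)
def pvShapeLt (a b : List PvCell) : Bool :=
  decide (a.map (fun p => toLex p) < b.map (fun p => toLex p))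

-- min(shapes): first minimal element; [] never reached (shapes always has 8 entries)
def pvMinShapesA : List (List PvCell) → List PvCell
  | [] => []
  | s :: t => t.foldl (fun acc x => if pvShapeLt x acc then x else acc) s

def pvNormalizeA (shape : List PvCell) : List PvCell :=
  let st := (List.range 2).foldl (fun (st : List (List PvCell) × List PvCell) _ =>
    let new0 := st.2.map (fun p => (p.1, p.2))
    let inner := (List.range 4).foldl (fun (st2 : List (List PvCell) × List PvCell) _ =>
      let ns := st2.2.map pvRotA
      (st2.1 ++ [pvNormSortA ns], ns)) (st.1, new0)
    (inner.1, st.2.map (fun p => (-p.1, p.2)))) ([], shape)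
  pvMinShapesA st.1

def numDistinctIslands2 (grid : List (List Int)) : Int :=
  let m : Int := grid.length
  let n : Int := (PySem.List.pyGetD grid 0 []).length   -- len(grid[0]); Pre_ excludes []
  let res := (PySem.List.pyRange 0 m 1).foldl (fun st i =>
    (PySem.List.pyRange 0 n 1).foldl (fun (st : PySem.Set PvCell × PySem.Set (List PvCell)) j =>
      if (PySem.List.pyGetD (PySem.List.pyGetD grid i []) j 0 == 1) && !(st.1.contains (i, j)) then
        let r := pvDfsA grid m n (5 * (m.toNat * n.toNat) + 2) [(i, j)] st.1 []
        (r.1, st.2.add (pvNormalizeA r.2))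
      else st) st) (PySem.Set.empty, PySem.Set.empty)
  PySem.Set.len res.2

-- ===== PORT B =====
def pvNbrsB (d : PvCell) : List PvCell :=
  [(d.1 + 1, d.2), (d.1 - 1, d.2), (d.1, d.2 + 1), (d.1, d.2 - 1)]

-- land = [(i, j) for i in range(m) for j in range(n) if grid[i][j] == 1]
def pvLandB (grid : List (List Int)) (n : Int) : List PvCell :=
  (PySem.List.pyRange 0 grid.length 1).flatMap (fun i =>
    ((PySem.List.pyRange 0 n 1).filter (fun j =>
      PySem.List.pyGetD (PySem.List.pyGetD grid i []) j 0 == 1)).map (fun j => (i, j)))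

-- the while-loop: comp grows every round, so 'land.length + 1' rounds always reach the break
def pvGrowB (land : List PvCell) : Nat → PySem.Set PvCell → PySem.Set PvCell
  | 0, comp => comp
  | fuel+1, comp =>
    let fringe := land.filter (fun d =>
      !(comp.contains d) && (pvNbrsB d).any (fun e => comp.contains e))
    if fringe.isEmpty then comp else pvGrowB land fuel (comp.update fringe)

def pvTransformsB : List (PvCell → PvCell) :=
  [fun p => (p.2, -p.1), fun p => (-p.1, -p.2), fun p => (-p.2, p.1), fun p => (p.1, p.2),
   fun p => (p.2, p.1), fun p => (p.1, -p.2), fun p => (-p.2, -p.1), fun p => (-p.1, p.2)]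

-- B sorts with the explicit tuple key (p[0], p[1]): PySem.List.sorted2
def pvCandB (pts : List PvCell) : List PvCell :=
  let mx := (PySem.List.min? (pts.map (fun p => p.1)) (fun v => v)).getD 0
  let my := (PySem.List.min? (pts.map (fun p => p.2)) (fun v => v)).getD 0
  PySem.List.sorted2 (pts.map (fun p => (p.1 - mx, p.2 - my))) (fun p => p.1) (fun p => p.2)

-- best-tracking minimum over the 8 transforms ('best is None or cand < best')
def pvCanonB (cells : List PvCell) : List PvCell :=
  (pvTransformsB.foldl (fun best t =>
    let cand := pvCandB (cells.map t)
    match best with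
    | none => some cand
    | some b =>
      if decide (cand.map (fun p => toLex p) < b.map (fun p => toLex p)) then some cand
      else some b) none).getD []

def numDistinctIslands2_alt (grid : List (List Int)) : Int :=
  let n : Int := (PySem.List.pyGetD grid 0 []).length   -- len(grid[0]); Pre_ excludes []
  let land := pvLandB grid n
  let res := land.foldl (fun (st : PySem.Set PvCell × PySem.Set (List PvCell)) c =>
    if st.1.contains c then st
    else
      let comp := pvGrowB land (land.length + 1) (PySem.Set.ofList [c])
      (st.1.update comp, st.2.add (pvCanonB comp))) (PySem.Set.empty, PySem.Set.empty)
  PySem.Set.len res.2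

-- ===== PRECONDITION & SPEC =====
-- Pre_ excludes exactly the inputs where the Python raises IndexError: the empty grid
-- (grid[0]) and grids with a row shorter than row 0 (grid[i][j] is read for every
-- j < len(grid[0])).  B raises there too.
def Pre_numDistinctIslands2 (grid : List (List Int)) : Prop :=
  grid ≠ [] ∧ ∀ row ∈ grid, grid.headI.length ≤ row.length
instance (grid : List (List Int)) : Decidable (Pre_numDistinctIslands2 grid) := by
  unfold Pre_numDistinctIslands2; infer_instance

def pvWitness_numDistinctIslands2 : List (List Int) := [[1, 0], [0, 1]]

def Spec_numDistinctIslands2 (grid : List (List Int)) (out : Int) : Prop :=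
  out = numDistinctIslands2_alt grid
instance (grid : List (List Int)) (out : Int) : Decidable (Spec_numDistinctIslands2 grid out) := by
  unfold Spec_numDistinctIslands2; infer_instance

-- ===== CLAIM (what is proved, stated in full; the proofs are below) =====
def Claim_equal_numDistinctIslands2 : Prop := ∀ (grid : List (List Int)), Dom_numDistinctIslands2 grid → Pre_numDistinctIslands2 grid → Spec_numDistinctIslands2 grid (numDistinctIslands2 grid)

-- ===== LEMMAS AND PROOFS =====

-- 4-adjacency, and reachability through land cells avoiding V
def pvAdj (c d : PvCell) : Prop := d ∈ pvNbrsB c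

inductive pvReach (land : List PvCell) (V : PvCell → Prop) : PvCell → PvCell → Prop
  | refl (c : PvCell) : c ∈ land → ¬ V c → pvReach land V c c
  | step {c d e : PvCell} : pvReach land V c d → pvAdj d e → e ∈ land → ¬ V e →
      pvReach land V c e

def pvClosed (land : List PvCell) (V : PvCell → Prop) : Prop :=
  ∀ x y, V x → pvAdj x y → y ∈ land → V y

theorem pvAdj_symm {c d : PvCell} (h : pvAdj c d) : pvAdj d c := by
  rcases c with ⟨a, b⟩; rcases d with ⟨x, y⟩
  simp only [pvAdj, pvNbrsB, List.mem_cons, List.not_mem_nil, or_false, Prod.mk.injEq] at *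
  omega

theorem pvContains_false {s : PySem.Set PvCell} {y : PvCell}
    (h : s.contains y = false) : ¬ y ∈ s := fun hm => by
  rw [(PySem.Set.contains_iff s y).mpr hm] at h; cases h

theorem pvContains_false_of_not {s : PySem.Set PvCell} {y : PvCell}
    (h : ¬ y ∈ s) : s.contains y = false := by
  cases hcs : s.contains y
  · rfl
  · exact absurd ((PySem.Set.contains_iff s y).mp hcs) h

theorem pvReach_land_left {land V} {c x : PvCell} (h : pvReach land V c x) :
    c ∈ land ∧ ¬ V c := by
  induction h with
  | refl hc hv => exact ⟨hc, hv⟩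
  | step _ _ _ _ ih => exact ih

theorem pvReach_land_right {land V} {c x : PvCell} (h : pvReach land V c x) :
    x ∈ land ∧ ¬ V x := by
  cases h with
  | refl hc hv => exact ⟨hc, hv⟩
  | step _ _ he hv => exact ⟨he, hv⟩

theorem pvReach_mono {land} {V V' : PvCell → Prop} (hVV : ∀ x, V x → V' x)
    {c x : PvCell} (h : pvReach land V' c x) : pvReach land V c x := by
  induction h with
  | refl hc hv => exact .refl _ hc (fun h => hv (hVV _ h))
  | step _ ha he hv ih => exact .step ih ha he (fun h => hv (hVV _ h))

theorem pvReach_trans {land V} {c d x : PvCell} (h1 : pvReach land V c d)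
    (h2 : pvReach land V d x) : pvReach land V c x := by
  induction h2 with
  | refl _ _ => exact h1
  | step _ ha he hv ih => exact .step ih ha he hv

-- on a closed avoided set, avoiding it is free
theorem pvReach_drop {land V} (hcl : pvClosed land V) {c x : PvCell} (hc : ¬ V c)
    (_ : c ∈ land) (h : pvReach land (fun _ => False) c x) : pvReach land V c x := by
  induction h with
  | refl hc' _ => exact .refl _ hc' hc
  | step hr ha he _ ih =>
      refine .step ih ha he (fun hv => ?_)
      exact (pvReach_land_right ih).2 (hcl _ _ hv (pvAdj_symm ha) (pvReach_land_right ih).1)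

-- ----- the land list -----
theorem pvMem_landB {grid : List (List Int)} {n : Int} {c : PvCell} :
    c ∈ pvLandB grid n ↔
      (0 ≤ c.1 ∧ c.1 < (grid.length : Int) ∧ 0 ≤ c.2 ∧ c.2 < n ∧
       (PySem.List.pyGetD (PySem.List.pyGetD grid c.1 []) c.2 0 == 1) = true) := by
  rcases c with ⟨i, j⟩
  simp only [pvLandB, List.mem_flatMap, List.mem_map, List.mem_filter,
    PySem.List.mem_pyRange_one]
  constructor
  · rintro ⟨i', ⟨hi1, hi2⟩, j', ⟨⟨hj1, hj2⟩, ht⟩, heq⟩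
    cases heq; exact ⟨hi1, hi2, hj1, hj2, ht⟩
  · rintro ⟨hi1, hi2, hj1, hj2, ht⟩
    exact ⟨i, ⟨hi1, hi2⟩, j, ⟨⟨hj1, hj2⟩, ht⟩, rfl⟩

theorem pvLandChkA_iff {grid : List (List Int)} {n : Int} {c : PvCell} :
    pvLandChkA grid (grid.length : Int) n c.1 c.2 = true ↔ c ∈ pvLandB grid n := by
  rw [pvMem_landB]
  simp [pvLandChkA, and_assoc]

def pvAllCells (grid : List (List Int)) (n : Int) : List PvCell :=
  (PySem.List.pyRange 0 grid.length 1).flatMap (fun i =>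
    (PySem.List.pyRange 0 n 1).map (fun j => (i, j)))

theorem pvLandB_eq_filter (grid : List (List Int)) (n : Int) :
    pvLandB grid n = (pvAllCells grid n).filter (fun c =>
      PySem.List.pyGetD (PySem.List.pyGetD grid c.1 []) c.2 0 == 1) := by
  unfold pvLandB pvAllCells
  rw [List.filter_flatMap]
  congr 1; funext i
  rw [List.filter_map]
  rfl

theorem pvLandB_length_le (grid : List (List Int)) (n : Int) :
    (pvLandB grid n).length ≤ grid.length * n.toNat := by
  rw [pvLandB_eq_filter]
  refine le_trans (List.length_filter_le _ _) ?_
  unfold pvAllCells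
  rw [List.length_flatMap]
  have h1 : ∀ i : Int, ((PySem.List.pyRange 0 n 1).map (fun j => ((i : Int), j))).length = n.toNat := by
    intro i
    rw [List.length_map, PySem.List.length_pyRange_one]
    omega
  calc (((PySem.List.pyRange 0 (grid.length : Int) 1)).map
        (fun i => (((PySem.List.pyRange 0 n 1)).map (fun j => (i, j))).length)).sum
      = (((PySem.List.pyRange 0 (grid.length : Int) 1)).map (fun _ => n.toNat)).sum := by
        congr 1; exact List.map_congr_left (fun i _ => h1 i)
    _ = (PySem.List.pyRange 0 (grid.length : Int) 1).length * n.toNat := by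
        rw [List.map_const', List.sum_replicate, smul_eq_mul]
    _ ≤ grid.length * n.toNat := by
        rw [PySem.List.length_pyRange_one]
        have : ((grid.length : Int) - 0).toNat = grid.length := by omega
        rw [this]

-- number of land cells not yet visited: the dfs termination measure
def pvU (land : List PvCell) (vis : PySem.Set PvCell) : Nat :=
  (land.filter (fun d => !(vis.contains d))).length

theorem pvU_le (land : List PvCell) (vis : PySem.Set PvCell) : pvU land vis ≤ land.length :=
  List.length_filter_le _ _

theorem pvU_add_lt {land : List PvCell} {vis : PySem.Set PvCell} {c : PvCell}
    (hc : c ∈ land) (hv : ¬ c ∈ vis) : pvU land (vis.add c) < pvU land vis := by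
  obtain ⟨l1, l2, rfl⟩ := List.append_of_mem hc
  unfold pvU
  have hmono : ∀ l' : List PvCell,
      (l'.filter (fun d => !(vis.add c).contains d)).length ≤
      (l'.filter (fun d => !vis.contains d)).length := by
    intro l'
    rw [← List.countP_eq_length_filter, ← List.countP_eq_length_filter]
    refine List.countP_mono_left (fun d _ hd => ?_)
    simp only [Bool.not_eq_true', ← Bool.not_eq_true] at hd ⊢
    intro hcon
    exact hd ((PySem.Set.contains_iff _ _).mpr ((PySem.Set.mem_add _ _ _).mpr
      (Or.inl ((PySem.Set.contains_iff _ _).mp hcon))))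
  have hc1 : (vis.add c).contains c = true :=
    (PySem.Set.contains_iff _ _).mpr ((PySem.Set.mem_add _ _ _).mpr (Or.inr rfl))
  have hc2 : vis.contains c = false := by
    rw [← Bool.not_eq_true, PySem.Set.contains_iff]; exact hv
  rw [List.filter_append, List.filter_append, List.filter_cons, List.filter_cons]
  simp only [hc1, hc2, Bool.not_true, Bool.not_false, List.length_append, List.length_cons,
    if_true, Bool.false_eq_true, if_false]
  have := hmono l1
  have := hmono l2
  omega

-- ----- the DFS characterisation -----
theorem pvReach_congr {land : List PvCell} {V V' : PvCell → Prop}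
    (h : ∀ x, V x ↔ V' x) {c x : PvCell} :
    pvReach land V c x ↔ pvReach land V' c x :=
  ⟨pvReach_mono (fun y hy => (h y).mpr hy), pvReach_mono (fun y hy => (h y).mp hy)⟩

theorem pvReach_exchange {land : List PvCell} {V : PvCell → Prop} {c : PvCell}
    (hc : ¬ V c) : ∀ {s x : PvCell}, pvReach land V s x →
      x = c ∨ ∃ t, (t = s ∨ (pvAdj c t ∧ t ∈ land ∧ ¬ V t ∧ t ≠ c)) ∧
        pvReach land (fun y => V y ∨ y = c) t x := by
  intro s x h
  induction h with
  | refl hs hv =>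
    by_cases hsc : s = c
    · exact Or.inl hsc
    · exact Or.inr ⟨s, Or.inl rfl, .refl s hs (by tauto)⟩
  | step hr ha he hv ih =>
    rename_i d e
    by_cases hec : e = c
    · exact Or.inl hec
    · right
      rcases ih with rfl | ⟨t, ht, hrt⟩
      · exact ⟨e, Or.inr ⟨ha, he, hv, hec⟩, .refl e he (by tauto)⟩
      · exact ⟨t, ht, .step hrt ha he (by tauto)⟩

theorem pvMem_dirs (cc nb : PvCell) :
    (nb ∈ pvDirsA.map (fun d => (cc.1 + d.1, cc.2 + d.2))) ↔ pvAdj cc nb := by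
  rcases cc with ⟨a, b⟩; rcases nb with ⟨x, y⟩
  simp only [pvDirsA, pvAdj, pvNbrsB, List.map_cons, List.map_nil, List.mem_cons,
    List.not_mem_nil, or_false, Prod.mk.injEq]
  omega

theorem pvDfsA_cons_skip {grid : List (List Int)} {m n : Int} {fuel : Nat} {c : PvCell}
    {rest : List PvCell} {vis : PySem.Set PvCell} {island : List PvCell}
    (h : vis.contains c = true) :
    pvDfsA grid m n (fuel+1) (c :: rest) vis island = pvDfsA grid m n fuel rest vis island := by
  simp only [pvDfsA]
  rw [if_pos h]

theorem pvDfsA_cons_go {grid : List (List Int)} {m n : Int} {fuel : Nat} {c : PvCell}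
    {rest : List PvCell} {vis : PySem.Set PvCell} {island : List PvCell}
    (h : vis.contains c = false) :
    pvDfsA grid m n (fuel+1) (c :: rest) vis island =
      pvDfsA grid m n fuel
        (((pvDirsA.map (fun d => (c.1 + d.1, c.2 + d.2))).filter
          (fun nb => pvLandChkA grid m n nb.1 nb.2 && !((vis.add c).contains nb))).reverse ++ rest)
        (vis.add c) (island ++ [c]) := by
  simp only [pvDfsA]
  rw [if_neg (by rw [h]; simp)]

theorem pvDfsA_spec (grid : List (List Int)) (n : Int) :
    ∀ (fuel : Nat) (stack : List PvCell) (vis : PySem.Set PvCell) (island : List PvCell),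
      5 * pvU (pvLandB grid n) vis + stack.length < fuel →
      (∀ s ∈ stack, s ∈ pvLandB grid n) →
      vis.Nodup →
      ((∀ x, x ∈ (pvDfsA grid (grid.length : Int) n fuel stack vis island).1 ↔
          x ∈ vis ∨ ∃ s ∈ stack, pvReach (pvLandB grid n) (· ∈ vis) s x) ∧
       (pvDfsA grid (grid.length : Int) n fuel stack vis island).1.Nodup ∧
       ∃ Δ, (pvDfsA grid (grid.length : Int) n fuel stack vis island).2 = island ++ Δ ∧
         Δ.Nodup ∧
         (∀ x, x ∈ Δ ↔ ∃ s ∈ stack, pvReach (pvLandB grid n) (· ∈ vis) s x)) := by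
  intro fuel
  induction fuel with
  | zero => intro stack vis island hfuel _ _; exact absurd hfuel (Nat.not_lt_zero _)
  | succ fuel ih =>
    intro stack vis island hfuel hstack hnd
    match stack with
    | [] =>
      refine ⟨?_, ?_, [], by simp [pvDfsA], List.nodup_nil, ?_⟩ <;> simp [pvDfsA, hnd]
    | c :: rest =>
      by_cases hvc : vis.contains c = true
      · -- already visited: skipped, and c contributes no reachable cells
        rw [pvDfsA_cons_skip hvc]
        have hcv : c ∈ vis := (PySem.Set.contains_iff _ _).mp hvc
        obtain ⟨H1, H2, Δ, H3, H4, H5⟩ := ih rest vis island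
          (by simp at hfuel ⊢; omega) (fun s hs => hstack s (List.mem_cons_of_mem _ hs)) hnd
        have hsrc : ∀ x, (∃ s ∈ c :: rest, pvReach (pvLandB grid n) (· ∈ vis) s x) ↔
            (∃ s ∈ rest, pvReach (pvLandB grid n) (· ∈ vis) s x) := by
          intro x
          constructor
          · rintro ⟨s, hs, hr⟩
            rcases List.mem_cons.mp hs with rfl | hs'
            · exact absurd hcv (pvReach_land_left hr).2
            · exact ⟨s, hs', hr⟩
          · rintro ⟨s, hs, hr⟩
            exact ⟨s, List.mem_cons_of_mem _ hs, hr⟩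
        exact ⟨fun x => by rw [H1, hsrc], H2, Δ, H3, H4, fun x => by rw [H5, hsrc]⟩
      · -- fresh cell: visit it and push its unvisited land neighbours
        have hvc' : vis.contains c = false := by simpa using hvc
        have hcv : ¬ c ∈ vis := pvContains_false hvc'
        have hcland : c ∈ pvLandB grid n := hstack c List.mem_cons_self
        rw [pvDfsA_cons_go hvc']
        set land := pvLandB grid n with hland
        set pushes := (pvDirsA.map (fun d => (c.1 + d.1, c.2 + d.2))).filter
          (fun nb => pvLandChkA grid (grid.length : Int) n nb.1 nb.2 && !((vis.add c).contains nb))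
          with hpushes
        have hpush : ∀ nb, nb ∈ pushes ↔ (pvAdj c nb ∧ nb ∈ land ∧ ¬ nb ∈ vis ∧ nb ≠ c) := by
          intro nb
          rw [hpushes, List.mem_filter]
          rw [pvMem_dirs c nb]
          constructor
          · rintro ⟨h1, h2⟩
            simp only [Bool.and_eq_true, Bool.not_eq_true'] at h2
            obtain ⟨h2a, h2b⟩ := h2
            have h3 : ¬ nb ∈ vis.add c := pvContains_false h2b
            rw [PySem.Set.mem_add] at h3
            push Not at h3
            exact ⟨h1, pvLandChkA_iff.mp h2a, h3.1, h3.2⟩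
          · rintro ⟨h1, h2, h3, h4⟩
            refine ⟨h1, ?_⟩
            simp only [Bool.and_eq_true, Bool.not_eq_true']
            refine ⟨pvLandChkA_iff.mpr h2, ?_⟩
            refine pvContains_false_of_not ?_
            rw [PySem.Set.mem_add]
            push Not
            exact ⟨h3, h4⟩
        have hVmem : ∀ y, y ∈ vis.add c ↔ y ∈ vis ∨ y = c := fun y => PySem.Set.mem_add _ _ _
        have hfuel' : 5 * pvU land (vis.add c) + (pushes.reverse ++ rest).length < fuel := by
          have hU := pvU_add_lt (vis := vis) hcland hcv
          have hp4 : pushes.length ≤ 4 := by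
            calc pushes.length ≤ (pvDirsA.map (fun d => (c.1 + d.1, c.2 + d.2))).length :=
                  List.length_filter_le _ _
              _ = 4 := by simp [pvDirsA]
          simp only [List.length_append, List.length_reverse, List.length_cons] at hfuel ⊢
          omega
        have hstack' : ∀ s ∈ pushes.reverse ++ rest, s ∈ land := by
          intro s hs
          rcases List.mem_append.mp hs with hs' | hs'
          · exact ((hpush s).mp (List.mem_reverse.mp hs')).2.1
          · exact hstack s (List.mem_cons_of_mem _ hs')
        obtain ⟨H1, H2, Δ', H3, H4, H5⟩ := ih (pushes.reverse ++ rest) (vis.add c)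
          (island ++ [c]) hfuel' hstack' (PySem.Set.nodup_add _ _ hnd)
        -- translate the reachable-from-sources set across the step
        have key : ∀ x, (∃ s ∈ c :: rest, pvReach land (· ∈ vis) s x) ↔
            (x = c ∨ ∃ s ∈ pushes.reverse ++ rest, pvReach land (· ∈ vis.add c) s x) := by
          intro x
          constructor
          · rintro ⟨s, hs, hr⟩
            rcases pvReach_exchange hcv hr with rfl | ⟨t, ht, hrt⟩
            · exact Or.inl rfl
            · right
              have hrt' : pvReach land (· ∈ vis.add c) t x :=
                (pvReach_congr (fun y => by rw [hVmem y])).mpr hrt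
              rcases ht with rfl | ⟨hadj, htl, htv, htc⟩
              · rcases List.mem_cons.mp hs with rfl | hs'
                · exact absurd (Or.inr rfl) (pvReach_land_left hrt).2
                · exact ⟨t, List.mem_append_right _ hs', hrt'⟩
              · exact ⟨t, List.mem_append_left _ (List.mem_reverse.mpr
                  ((hpush t).mpr ⟨hadj, htl, htv, htc⟩)), hrt'⟩
          · rintro (rfl | ⟨s, hs, hr⟩)
            · exact ⟨x, List.mem_cons_self, .refl x hcland hcv⟩
            · have hr0 : pvReach land (· ∈ vis) s x :=
                pvReach_mono (fun y hy => (hVmem y).mpr (Or.inl hy)) hr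
              rcases List.mem_append.mp hs with hs' | hs'
              · obtain ⟨hadj, hsl, hsv, _⟩ := (hpush s).mp (List.mem_reverse.mp hs')
                exact ⟨c, List.mem_cons_self,
                  pvReach_trans (.step (.refl c hcland hcv) hadj hsl hsv) hr0⟩
              · exact ⟨s, List.mem_cons_of_mem _ hs', hr0⟩
        have hcΔ' : ¬ c ∈ Δ' := by
          intro hmem
          obtain ⟨s, _, hr⟩ := (H5 c).mp hmem
          exact (pvReach_land_right hr).2 ((hVmem c).mpr (Or.inr rfl))
        refine ⟨?_, H2, c :: Δ', by rw [H3, List.append_assoc]; rfl,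
          List.nodup_cons.mpr ⟨hcΔ', H4⟩, ?_⟩
        · intro x
          rw [H1 x, key x, hVmem x]
          tauto
        · intro x
          rw [List.mem_cons, H5 x, key x]

-- ----- the fixpoint-expansion characterisation -----
theorem pvGrowB_spec {grid : List (List Int)} {n : Int} {c : PvCell} :
    ∀ (fuel : Nat) (comp : PySem.Set PvCell), comp.Nodup →
      (∀ x ∈ comp, pvReach (pvLandB grid n) (fun _ => False) c x) →
      c ∈ comp →
      (pvLandB grid n).length + 1 ≤ fuel + comp.length →
      ((pvGrowB (pvLandB grid n) fuel comp).Nodup ∧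
       ∀ x, x ∈ pvGrowB (pvLandB grid n) fuel comp ↔
         pvReach (pvLandB grid n) (fun _ => False) c x) := by
  set land := pvLandB grid n with hland
  intro fuel
  induction fuel with
  | zero =>
    intro comp hnd hreach hc hfuel
    exfalso
    have hsub : comp ⊆ land := fun x hx => (pvReach_land_right (hreach x hx)).1
    have := (List.subperm_of_subset hnd hsub).length_le
    omega
  | succ fuel ih =>
    intro comp hnd hreach hc hfuel
    set fringe := land.filter (fun d =>
      !(comp.contains d) && (pvNbrsB d).any (fun e => comp.contains e)) with hfr
    have hfrmem : ∀ d, d ∈ fringe ↔ (d ∈ land ∧ ¬ d ∈ comp ∧ ∃ e ∈ comp, pvAdj d e) := by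
      intro d
      rw [hfr, List.mem_filter]
      simp only [Bool.and_eq_true, Bool.not_eq_true', List.any_eq_true]
      constructor
      · rintro ⟨hdl, ⟨h1, e, he, hec⟩⟩
        exact ⟨hdl, pvContains_false h1, e, (PySem.Set.contains_iff _ _).mp hec, he⟩
      · rintro ⟨hdl, hdc, e, hec, hadj⟩
        exact ⟨hdl, pvContains_false_of_not hdc, e, hadj, (PySem.Set.contains_iff _ _).mpr hec⟩
    cases hE : fringe.isEmpty
    · -- the fringe is nonempty: one more expansion round
      have hfrne : fringe ≠ [] := by
        intro h; rw [h] at hE; simp at hE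
      have hgrow : pvGrowB land (fuel+1) comp = pvGrowB land fuel (comp.update fringe) := by
        simp only [pvGrowB]
        rw [← hfr, hE]
        simp
      rw [hgrow]
      have hmem' : ∀ x, x ∈ comp.update fringe ↔ x ∈ comp ∨ x ∈ fringe :=
        fun x => PySem.Set.mem_update _ _ _
      have hreach' : ∀ x ∈ comp.update fringe, pvReach land (fun _ => False) c x := by
        intro x hx
        rcases (hmem' x).mp hx with hx' | hx'
        · exact hreach x hx'
        · obtain ⟨hl, _, e, hec, hadj⟩ := (hfrmem x).mp hx'
          exact .step (hreach e hec) (pvAdj_symm hadj) hl not_false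
      obtain ⟨d, hd⟩ := List.exists_mem_of_ne_nil fringe hfrne
      have hdnc : ¬ d ∈ comp := ((hfrmem d).mp hd).2.1
      have hsub : (d :: comp) ⊆ comp.update fringe := by
        intro y hy
        rcases List.mem_cons.mp hy with rfl | hy'
        · exact (hmem' y).mpr (Or.inr hd)
        · exact (hmem' y).mpr (Or.inl hy')
      have hlen := (List.subperm_of_subset (List.nodup_cons.mpr ⟨hdnc, hnd⟩) hsub).length_le
      simp only [List.length_cons] at hlen
      exact ih (comp.update fringe) (PySem.Set.nodup_update _ _ hnd) hreach'
        ((hmem' c).mpr (Or.inl hc)) (by omega)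
    · -- empty fringe: comp is closed, hence exactly the reachable set
      have hfrnil : fringe = [] := List.isEmpty_iff.mp hE
      have hgrow : pvGrowB land (fuel+1) comp = comp := by
        simp only [pvGrowB]
        rw [← hfr, hE]
        simp
      rw [hgrow]
      refine ⟨hnd, fun x => ⟨fun hx => hreach x hx, fun hr => ?_⟩⟩
      induction hr with
      | refl _ _ => exact hc
      | step hr' hadj hlande hve ih' =>
        rename_i d' e'
        by_cases hec : e' ∈ comp
        · exact hec
        · exfalso
          have : e' ∈ fringe := (hfrmem e').mpr ⟨hlande, hec, d', ih', pvAdj_symm hadj⟩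
          rw [hfrnil] at this
          cases this

-- ----- normalize = canonical on permuted cell lists -----
theorem pvMin?_perm {l1 l2 : List Int} (h : l1.Perm l2) :
    PySem.List.min? l1 (fun v => v) = PySem.List.min? l2 (fun v => v) := by
  rcases h1 : PySem.List.min? l1 (fun v => v) with _ | a
  · rw [PySem.List.min?_eq_none_iff] at h1
    subst h1
    rw [eq_comm, PySem.List.min?_eq_none_iff]
    exact h.nil_eq.symm
  · rcases h2 : PySem.List.min? l2 (fun v => v) with _ | b
    · rw [PySem.List.min?_eq_none_iff] at h2
      subst h2
      obtain rfl := List.perm_nil.mp h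
      rw [(PySem.List.min?_eq_none_iff [] (fun v => v)).mpr rfl] at h1
      cases h1
    · have ha : a ∈ l2 := h.mem_iff.mp (PySem.List.min?_mem h1)
      have hb : b ∈ l1 := h.mem_iff.mpr (PySem.List.min?_mem h2)
      have h3 := PySem.List.min?_isMin h1 b hb
      have h4 := PySem.List.min?_isMin h2 a ha
      simp only [Option.some.injEq]
      exact le_antisymm h3 h4

-- the explicit tuple key (·.1, ·.2) sorts exactly like the lexicographic key toLex
theorem pvSorted2_eq (xs : List PvCell) :
    PySem.List.sorted2 xs (fun p => p.1) (fun p => p.2) =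
      PySem.List.sorted xs (fun p => toLex p) := by
  have hb : (fun (a b : PvCell) => decide (a.1 < b.1) || (!decide (b.1 < a.1) && decide (a.2 < b.2)))
      = (fun (a b : PvCell) => decide (toLex a < toLex b)) := by
    funext a b
    rw [Bool.eq_iff_iff]
    simp only [Bool.or_eq_true, Bool.and_eq_true, Bool.not_eq_true', decide_eq_true_eq,
      decide_eq_false_iff_not]
    rw [Prod.Lex.toLex_lt_toLex]
    omega
  rw [PySem.List.sorted_eq_foldl_insertBy]
  show List.foldl (fun acc x => PySem.List.insertBy
    (fun a b => decide (a.1 < b.1) || (!decide (b.1 < a.1) && decide (a.2 < b.2))) x acc) [] xs = _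
  rw [hb]

theorem pvNormSort_perm {l1 l2 : List PvCell} (h : l1.Perm l2) :
    pvNormSortA l1 = pvCandB l2 := by
  unfold pvNormSortA pvCandB
  rw [pvMin?_perm (h.map (fun p => p.1)), pvMin?_perm (h.map (fun p => p.2))]
  rw [pvSorted2_eq]
  exact PySem.List.sorted_eq_sorted_of_perm _ _ _
    (fun a b hab => by simpa using hab) (h.map _)

theorem pvFold_aux (cells : List PvCell) : ∀ (ts : List (PvCell → PvCell)) (acc : List PvCell),
    (ts.foldl (fun best t =>
      let cand := pvCandB (cells.map t)
      match best with
      | none => some cand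
      | some b =>
        if decide (cand.map (fun p => toLex p) < b.map (fun p => toLex p)) then some cand
        else some b) (some acc)).getD [] =
    ts.foldl (fun acc t =>
      if pvShapeLt (pvCandB (cells.map t)) acc then pvCandB (cells.map t) else acc) acc := by
  intro ts
  induction ts with
  | nil => intro acc; rfl
  | cons t ts ih =>
    intro acc
    simp only [List.foldl_cons, pvShapeLt]
    rw [← apply_ite some]
    exact ih _

theorem pvCanon_eq {shape cells : List PvCell} (h : shape.Perm cells) :
    pvNormalizeA shape = pvCanonB cells := by
  have h2 : List.range 2 = [0, 1] := rfl
  have h4 : List.range 4 = [0, 1, 2, 3] := rfl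
  have c2 : (pvRotA ∘ pvRotA) = fun p : PvCell => ((-p.1, -p.2) : PvCell) := by
    funext p; simp only [pvRotA, Function.comp_apply]; (try simp [Prod.ext_iff]); (try omega)
  have c3 : (pvRotA ∘ pvRotA ∘ pvRotA) = fun p : PvCell => ((-p.2, p.1) : PvCell) := by
    funext p; simp only [pvRotA, Function.comp_apply]; (try simp [Prod.ext_iff]); (try omega)
  have c4 : (pvRotA ∘ pvRotA ∘ pvRotA ∘ pvRotA) = fun p : PvCell => ((p.1, p.2) : PvCell) := by
    funext p; simp only [pvRotA, Function.comp_apply]; (try simp [Prod.ext_iff]); (try omega)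
  have c5 : (pvRotA ∘ fun p : PvCell => ((-p.1, p.2) : PvCell)) =
      fun p : PvCell => ((p.2, p.1) : PvCell) := by funext p; simp only [pvRotA, Function.comp_apply]; (try simp [Prod.ext_iff]); (try omega)
  have c6 : ((pvRotA ∘ pvRotA) ∘ fun p : PvCell => ((-p.1, p.2) : PvCell)) =
      fun p : PvCell => ((p.1, -p.2) : PvCell) := by funext p; simp only [pvRotA, Function.comp_apply]; (try simp [Prod.ext_iff]); (try omega)
  have c7 : ((pvRotA ∘ pvRotA ∘ pvRotA) ∘ fun p : PvCell => ((-p.1, p.2) : PvCell)) =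
      fun p : PvCell => ((-p.2, -p.1) : PvCell) := by funext p; simp only [pvRotA, Function.comp_apply]; (try simp [Prod.ext_iff]); (try omega)
  have c8 : ((pvRotA ∘ pvRotA ∘ pvRotA ∘ pvRotA) ∘ fun p : PvCell => ((-p.1, p.2) : PvCell)) =
      fun p : PvCell => ((-p.1, p.2) : PvCell) := by funext p; simp only [pvRotA, Function.comp_apply]; (try simp [Prod.ext_iff]); (try omega)
  conv_lhs => simp only [pvNormalizeA, h2, h4, List.foldl_cons, List.foldl_nil,
    List.map_map, Prod.mk.eta, List.map_id']
  rw [c8, c7, c6, c5, c4, c3, c2]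
  have e1 : pvNormSortA (shape.map pvRotA) =
      pvCandB (cells.map (fun p : PvCell => ((p.2, -p.1) : PvCell))) :=
    pvNormSort_perm (h.map pvRotA)
  have e2 : pvNormSortA (shape.map (fun p : PvCell => ((-p.1, -p.2) : PvCell))) =
      pvCandB (cells.map (fun p : PvCell => ((-p.1, -p.2) : PvCell))) := pvNormSort_perm (h.map _)
  have e3 : pvNormSortA (shape.map (fun p : PvCell => ((-p.2, p.1) : PvCell))) =
      pvCandB (cells.map (fun p : PvCell => ((-p.2, p.1) : PvCell))) := pvNormSort_perm (h.map _)
  have e4 : pvNormSortA (shape.map (fun p : PvCell => ((p.1, p.2) : PvCell))) =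
      pvCandB (cells.map (fun p : PvCell => ((p.1, p.2) : PvCell))) := pvNormSort_perm (h.map _)
  have e5 : pvNormSortA (shape.map (fun p : PvCell => ((p.2, p.1) : PvCell))) =
      pvCandB (cells.map (fun p : PvCell => ((p.2, p.1) : PvCell))) := pvNormSort_perm (h.map _)
  have e6 : pvNormSortA (shape.map (fun p : PvCell => ((p.1, -p.2) : PvCell))) =
      pvCandB (cells.map (fun p : PvCell => ((p.1, -p.2) : PvCell))) := pvNormSort_perm (h.map _)
  have e7 : pvNormSortA (shape.map (fun p : PvCell => ((-p.2, -p.1) : PvCell))) =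
      pvCandB (cells.map (fun p : PvCell => ((-p.2, -p.1) : PvCell))) := pvNormSort_perm (h.map _)
  have e8 : pvNormSortA (shape.map (fun p : PvCell => ((-p.1, p.2) : PvCell))) =
      pvCandB (cells.map (fun p : PvCell => ((-p.1, p.2) : PvCell))) := pvNormSort_perm (h.map _)
  rw [e1, e2, e3, e4, e5, e6, e7, e8]
  rw [pvCanonB, pvTransformsB]
  rw [List.foldl_cons]
  rw [pvFold_aux]
  simp only [List.nil_append, List.singleton_append, List.cons_append]
  simp only [pvMinShapesA, List.foldl_cons, List.foldl_nil, pvShapeLt]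

-- ----- the main loops -----
def pvStepA (grid : List (List Int)) (n : Int)
    (st : PySem.Set PvCell × PySem.Set (List PvCell)) (c : PvCell) :
    PySem.Set PvCell × PySem.Set (List PvCell) :=
  if (PySem.List.pyGetD (PySem.List.pyGetD grid c.1 []) c.2 0 == 1) && !(st.1.contains c) then
    let r := pvDfsA grid (grid.length : Int) n
      (5 * (((grid.length : Int)).toNat * n.toNat) + 2) [c] st.1 []
    (r.1, st.2.add (pvNormalizeA r.2))
  else st

def pvStepB (grid : List (List Int)) (n : Int)
    (st : PySem.Set PvCell × PySem.Set (List PvCell)) (c : PvCell) :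
    PySem.Set PvCell × PySem.Set (List PvCell) :=
  if st.1.contains c then st
  else
    let comp := pvGrowB (pvLandB grid n) ((pvLandB grid n).length + 1) (PySem.Set.ofList [c])
    (st.1.update comp, st.2.add (pvCanonB comp))

theorem pvA_eq (grid : List (List Int)) :
    numDistinctIslands2 grid =
      PySem.Set.len ((pvLandB grid ((PySem.List.pyGetD grid 0 []).length : Int)).foldl
        (pvStepA grid ((PySem.List.pyGetD grid 0 []).length : Int))
        (PySem.Set.empty, PySem.Set.empty)).2 := by
  have h0 : numDistinctIslands2 grid =
      PySem.Set.len (((PySem.List.pyRange 0 (grid.length : Int) 1).foldl (fun st i =>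
        (PySem.List.pyRange 0 ((PySem.List.pyGetD grid 0 []).length : Int) 1).foldl
          (fun st j => pvStepA grid ((PySem.List.pyGetD grid 0 []).length : Int) st (i, j)) st)
        (PySem.Set.empty, PySem.Set.empty)).2) := rfl
  rw [h0]
  congr 1
  set n : Int := ((PySem.List.pyGetD grid 0 []).length : Int) with hn
  have hsplit : (PySem.List.pyRange 0 (grid.length : Int) 1).foldl (fun st i =>
        (PySem.List.pyRange 0 n 1).foldl (fun st j => pvStepA grid n st (i, j)) st)
        ((PySem.Set.empty : PySem.Set PvCell), (PySem.Set.empty : PySem.Set (List PvCell))) =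
      (pvAllCells grid n).foldl (pvStepA grid n) (PySem.Set.empty, PySem.Set.empty) := by
    rw [pvAllCells, List.foldl_flatMap]
    congr 1
    funext acc i
    rw [List.foldl_map]
  rw [hsplit]
  have hguard : (fun (st : PySem.Set PvCell × PySem.Set (List PvCell)) (c : PvCell) =>
      if (PySem.List.pyGetD (PySem.List.pyGetD grid c.1 []) c.2 0 == 1) then pvStepA grid n st c
      else st) = pvStepA grid n := by
    funext st c
    by_cases hp : (PySem.List.pyGetD (PySem.List.pyGetD grid c.1 []) c.2 0 == 1) = true
    · rw [if_pos hp]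
    · rw [if_neg hp]
      unfold pvStepA
      rw [if_neg (by
        intro hcon
        exact hp (Bool.and_elim_left hcon))]
  rw [pvLandB_eq_filter, List.foldl_filter, hguard]

theorem pvB_eq (grid : List (List Int)) :
    numDistinctIslands2_alt grid =
      PySem.Set.len ((pvLandB grid ((PySem.List.pyGetD grid 0 []).length : Int)).foldl
        (pvStepB grid ((PySem.List.pyGetD grid 0 []).length : Int))
        (PySem.Set.empty, PySem.Set.empty)).2 := by
  rfl

theorem pvMain (grid : List (List Int)) (n : Int) :
    ∀ (l : List PvCell) (visA : PySem.Set PvCell) (uniqA : PySem.Set (List PvCell))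
      (visB : PySem.Set PvCell) (uniqB : PySem.Set (List PvCell)),
      (∀ c ∈ l, c ∈ pvLandB grid n) →
      (∀ x, x ∈ visA ↔ x ∈ visB) →
      visA.Nodup → visB.Nodup →
      (∀ x ∈ visA, x ∈ pvLandB grid n) →
      pvClosed (pvLandB grid n) (· ∈ visA) →
      uniqA = uniqB →
      (l.foldl (pvStepA grid n) (visA, uniqA)).2 = (l.foldl (pvStepB grid n) (visB, uniqB)).2 := by
  intro l
  induction l with
  | nil => intro _ _ _ _ _ _ _ _ huniq; simpa using huniq
  | cons c l ih =>
    intro visA uniqA visB uniqB hl hmem hndA hndB hsubA hclosed huniq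
    set land := pvLandB grid n with hland
    have hcl : c ∈ land := hl c List.mem_cons_self
    simp only [List.foldl_cons]
    by_cases hvc : c ∈ visA
    · have hA : pvStepA grid n (visA, uniqA) c = (visA, uniqA) := by
        unfold pvStepA
        rw [if_neg (by
          intro hcon
          have := Bool.and_elim_right hcon
          rw [(PySem.Set.contains_iff visA c).mpr hvc] at this
          cases this)]
      have hB : pvStepB grid n (visB, uniqB) c = (visB, uniqB) := by
        unfold pvStepB
        rw [if_pos ((PySem.Set.contains_iff visB c).mpr ((hmem c).mp hvc))]
      rw [hA, hB]
      exact ih visA uniqA visB uniqB (fun d hd => hl d (List.mem_cons_of_mem _ hd))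
        hmem hndA hndB hsubA hclosed huniq
    · -- fresh representative: A runs its dfs, B its fixpoint expansion
      have hvcB : ¬ c ∈ visB := fun hb => hvc ((hmem c).mpr hb)
      have htest : (PySem.List.pyGetD (PySem.List.pyGetD grid c.1 []) c.2 0 == 1) = true :=
        (pvMem_landB.mp hcl).2.2.2.2
      have hcontA : visA.contains c = false := pvContains_false_of_not hvc
      have hcontB : visB.contains c = false := pvContains_false_of_not hvcB
      have hA : pvStepA grid n (visA, uniqA) c =
          ((pvDfsA grid (grid.length : Int) n
              (5 * (((grid.length : Int)).toNat * n.toNat) + 2) [c] visA []).1,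
           uniqA.add (pvNormalizeA (pvDfsA grid (grid.length : Int) n
              (5 * (((grid.length : Int)).toNat * n.toNat) + 2) [c] visA []).2)) := by
        unfold pvStepA
        rw [if_pos (by rw [htest, hcontA]; rfl)]
      have hB : pvStepB grid n (visB, uniqB) c =
          (visB.update (pvGrowB land (land.length + 1) (PySem.Set.ofList [c])),
           uniqB.add (pvCanonB (pvGrowB land (land.length + 1) (PySem.Set.ofList [c])))) := by
        unfold pvStepB
        rw [if_neg (by rw [hcontB]; simp)]
      rw [hA, hB]
      -- dfs characterisation
      have hfuel : 5 * pvU land visA + ([c] : List PvCell).length <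
          5 * (((grid.length : Int)).toNat * n.toNat) + 2 := by
        have h1 : pvU land visA ≤ land.length := pvU_le land visA
        have h2 : land.length ≤ grid.length * n.toNat := pvLandB_length_le grid n
        simp only [List.length_cons, List.length_nil, Int.toNat_natCast]
        omega
      obtain ⟨H1, H2, Δ, H3, H4, H5⟩ := pvDfsA_spec grid n
        (5 * (((grid.length : Int)).toNat * n.toNat) + 2) [c] visA []
        hfuel (by intro s hs; rw [List.mem_singleton] at hs; exact hs ▸ hcl) hndA
      rw [List.nil_append] at H3
      -- fixpoint characterisation
      have hofl : (PySem.Set.ofList [c] : PySem.Set PvCell) = [c] := rfl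
      obtain ⟨Gnd, Gmem⟩ := pvGrowB_spec (grid := grid) (n := n) (c := c)
        (land.length + 1) (PySem.Set.ofList [c])
        (by rw [hofl]; exact List.nodup_singleton c)
        (by
          rw [hofl]
          intro x hx
          rw [List.mem_singleton] at hx
          subst hx
          exact .refl _ hcl not_false)
        (by rw [hofl]; exact List.mem_singleton_self c)
        (by rw [hofl]; exact Nat.le_succ (land.length + 1))
      -- both new cell sets are exactly Reach(c) (plus the old visited set)
      have hiff : ∀ x, pvReach land (· ∈ visA) c x ↔ pvReach land (fun _ => False) c x :=
        fun x => ⟨pvReach_mono (fun y hy => hy.elim), pvReach_drop hclosed hvc hcl⟩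
      have hsingle : ∀ x, (∃ s ∈ ([c] : List PvCell), pvReach land (· ∈ visA) s x) ↔
          pvReach land (· ∈ visA) c x := by
        intro x
        constructor
        · rintro ⟨s, hs, hr⟩; rw [List.mem_singleton] at hs; exact hs ▸ hr
        · intro hr; exact ⟨c, List.mem_singleton_self c, hr⟩
      have hperm : Δ.Perm (pvGrowB land (land.length + 1) (PySem.Set.ofList [c])) := by
        rw [List.perm_ext_iff_of_nodup H4 Gnd]
        intro x
        rw [H5 x, hsingle x, hiff x, Gmem x]
      have hval : pvNormalizeA (pvDfsA grid (grid.length : Int) n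
          (5 * (((grid.length : Int)).toNat * n.toNat) + 2) [c] visA []).2 =
          pvCanonB (pvGrowB land (land.length + 1) (PySem.Set.ofList [c])) := by
        rw [H3]
        exact pvCanon_eq hperm
      -- apply the induction hypothesis to the new states
      refine ih _ _ _ _ (fun d hd => hl d (List.mem_cons_of_mem _ hd)) ?_ H2
        (PySem.Set.nodup_update _ _ hndB) ?_ ?_ (by rw [hval, huniq])
      · intro x
        rw [H1 x, hsingle x, hiff x, PySem.Set.mem_update, hmem x, Gmem x]
      · intro x hx
        rcases (H1 x).mp hx with hx' | hx'
        · exact hsubA x hx'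
        · exact (pvReach_land_right ((hsingle x).mp hx')).1
      · intro x y hx hadj hyl
        rcases (H1 x).mp hx with hx' | hx'
        · exact (H1 y).mpr (Or.inl (hclosed x y hx' hadj hyl))
        · by_cases hy : y ∈ visA
          · exact (H1 y).mpr (Or.inl hy)
          · exact (H1 y).mpr (Or.inr ((hsingle y).mpr
              (.step ((hsingle x).mp hx') hadj hyl hy)))

-- ===== VERDICT (by name: the statement is the Claim_ definition above) =====
theorem numDistinctIslands2_spec : Claim_equal_numDistinctIslands2 := by
  intro grid _ _
  unfold Spec_numDistinctIslands2
  rw [pvA_eq, pvB_eq]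
  congr 1
  exact pvMain grid _ _ PySem.Set.empty PySem.Set.empty PySem.Set.empty PySem.Set.empty
    (fun c h => h) (fun x => Iff.rfl) List.nodup_nil List.nodup_nil
    (fun x h => absurd h (List.not_mem_nil)) (fun x y h => absurd h (List.not_mem_nil)) rfl
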